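-- pv_equiv track=rewrite | github.com/KumaTea/bots-share | tools.py | trim_key
-- ===== SOURCE A (Python) =====
-- def trim_key(data: dict, char: str = '_'):
--     """
--     Remove keys that start with char,
--     defaults to '_'.
--     """
--     trim_list = []
--     for i in data:
--         if i.startswith(char):
--             trim_list.append(i)
--     for i in trim_list:
--         data.pop(i)
--     return data
-- ===== SOURCE B (Python) =====
-- def trim_key(data: dict, char: str = '_'):
--     """
--     Remove keys that start with char,
--     defaults to '_'.
--     """
--     kept = {k: v for k, v in data.items() if not k.startswith(char)}
--     data.clear()
--     data.update(kept)
--     return data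
-- ===== Notes on version B (the rewrite author's own statement) =====
-- stated objective: simpler
-- what changed: Instead of collecting the offending keys in a list and then popping them one by one, B builds the dict of surviving entries in a single filtering comprehension (inverted predicate) and replaces data's contents wholesale with clear()+update(), preserving the in-place mutation contract.
import Mathlib
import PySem

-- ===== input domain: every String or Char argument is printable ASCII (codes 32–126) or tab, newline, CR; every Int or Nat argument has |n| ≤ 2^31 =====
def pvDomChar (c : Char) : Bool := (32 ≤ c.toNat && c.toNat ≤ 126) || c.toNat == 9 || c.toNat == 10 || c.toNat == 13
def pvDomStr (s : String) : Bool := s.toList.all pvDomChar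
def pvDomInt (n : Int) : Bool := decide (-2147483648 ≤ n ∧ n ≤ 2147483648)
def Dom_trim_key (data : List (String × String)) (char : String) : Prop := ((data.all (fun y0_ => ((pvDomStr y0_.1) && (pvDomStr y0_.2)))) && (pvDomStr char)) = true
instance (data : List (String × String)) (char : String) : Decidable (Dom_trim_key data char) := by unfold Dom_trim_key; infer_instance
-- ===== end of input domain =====

-- Note: the Python versions mutate `data` in place and return it; both A and B perform the
-- same mutation (removing the keys starting with `char`), and the equivalence proved here is
-- about the returned association list.

-- ===== PORT A =====
-- data.pop(i): remove the first pair whose key is k. Python's pop raises KeyError when the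
-- key is absent; in A every popped key is present at the time of the pop, so the no-op
-- branch on the empty list is never reached on A's executions and the port is exact.
def popKey (d : List (String × String)) (k : String) : List (String × String) :=
  match d with
  | [] => []
  | p :: t => if p.1 == k then t else p :: popKey t k

def trim_key (data : List (String × String)) (char : String) : List (String × String) :=
  -- for i in data: if i.startswith(char): trim_list.append(i)
  let trim_list := data.foldl (fun acc p => if PySem.Str.startswith p.1 char then acc ++ [p.1] else acc) []
  -- for i in trim_list: data.pop(i)
  trim_list.foldl popKey data

-- ===== PORT B =====
def trim_key_alt (data : List (String × String)) (char : String) : List (String × String) :=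
  -- kept = {k: v for k, v in data.items() if not k.startswith(char)}; data.clear(); data.update(kept)
  let kept := data.filter (fun p => !(PySem.Str.startswith p.1 char))
  kept

-- ===== PRECONDITION & SPEC =====
def Spec_trim_key (data : List (String × String)) (char : String) (out : List (String × String)) : Prop := out = trim_key_alt data char
instance (data : List (String × String)) (char : String) (out : List (String × String)) : Decidable (Spec_trim_key data char out) := by unfold Spec_trim_key; infer_instance

-- ===== CLAIM (what is proved, stated in full; the proofs are below) =====
def Claim_equal_trim_key : Prop := ∀ (data : List (String × String)) (char : String), Dom_trim_key data char → Spec_trim_key data char (trim_key data char)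

-- ===== LEMMAS AND PROOFS =====

-- Phase 1 of A builds exactly the keys of the pairs whose key starts with char, in order.
theorem trimlist_eq (char : String) :
    ∀ (d : List (String × String)) (acc : List String),
      d.foldl (fun acc p => if PySem.Str.startswith p.1 char then acc ++ [p.1] else acc) acc
        = acc ++ (d.filter (fun p => PySem.Str.startswith p.1 char)).map Prod.fst := by
  intro d
  induction d with
  | nil => intro acc; simp
  | cons p t ih =>
    intro acc
    cases h : PySem.Str.startswith p.1 char <;>
      simp only [List.foldl_cons, List.filter_cons, h, if_pos, if_neg, Bool.false_eq_true,
        not_false_eq_true, List.map_cons, ih]; simp [List.append_assoc]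

-- popKey commutes past a head pair whose key is not popped.
theorem foldl_popKey_cons (k : String) (v : String) :
    ∀ (l : List String) (t : List (String × String)), (∀ x ∈ l, x ≠ k) →
      l.foldl popKey ((k, v) :: t) = (k, v) :: l.foldl popKey t := by
  intro l
  induction l with
  | nil => intro t _; rfl
  | cons x xs ih =>
    intro t hne
    have hx : x ≠ k := hne x (by simp)
    have : popKey ((k, v) :: t) x = (k, v) :: popKey t x := by
      simp [popKey, (by simpa using (beq_eq_false_iff_ne (a := k) (b := x)).2 (Ne.symm hx))]
    rw [List.foldl_cons, this, List.foldl_cons, ih _ (fun y hy => hne y (by simp [hy]))]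

-- Popping, in order, the keys of the pairs that start with char leaves exactly the others.
theorem foldl_popKey_filter (char : String) :
    ∀ (d : List (String × String)),
      ((d.filter (fun p => PySem.Str.startswith p.1 char)).map Prod.fst).foldl popKey d
        = d.filter (fun p => !(PySem.Str.startswith p.1 char)) := by
  intro d
  induction d with
  | nil => rfl
  | cons p t ih =>
    cases h : PySem.Str.startswith p.1 char
    case true =>
      simp only [List.filter_cons, h, if_pos, List.map_cons, List.foldl_cons]
      have : popKey (p :: t) p.1 = t := by simp [popKey]
      simpa [this, h] using ih
    case false =>
      have hfilter : (p :: t).filter (fun q => PySem.Str.startswith q.1 char)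
          = t.filter (fun q => PySem.Str.startswith q.1 char) := by
        simp only [List.filter_cons, h]; simp
      have hne : ∀ x ∈ (t.filter (fun q => PySem.Str.startswith q.1 char)).map Prod.fst, x ≠ p.1 := by
        intro x hx hxe
        rcases List.mem_map.1 hx with ⟨q, hq, rfl⟩
        have := List.of_mem_filter hq
        rw [hxe, h] at this
        exact Bool.false_ne_true this
      rw [hfilter, show (p : String × String) :: t = (p.1, p.2) :: t by rfl,
        foldl_popKey_cons p.1 p.2 _ t hne]
      simp only [List.filter_cons, h, Bool.not_false, if_pos]
      exact congrArg (List.cons (p.1, p.2)) ih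

-- ===== VERDICT (by name: the statement is the Claim_ definition above) =====
theorem trim_key_spec : Claim_equal_trim_key := by
  intro data char _
  unfold Spec_trim_key trim_key trim_key_alt
  rw [trimlist_eq char data []]
  simpa using foldl_popKey_filter char data
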